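-- pv_equiv track=rewrite | github.com/td-org-uit-no/UiTHack20 | Misc/6. The never-ending corn maze/src/solver.py | parse_list_to_op_string
-- ===== SOURCE A (Python) =====
-- def parse_list_to_op_string(pathlist):
--     string = ''
--     prev_x = -1
--     prev_y = -1
--     for x, y in pathlist:
--         if prev_x == -1 and prev_y == -1:
--             prev_x = x
--             prev_y = y
--             continue
--         else:
--             if prev_x == x and prev_y < y:  # moved only downwards
--                 string += 'd'
--             elif prev_x == x and prev_y > y:  # moved only upwards
--                 string += 'a'
--             elif prev_y == y and prev_x > x:  # moved only left
--                 string += 'w'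
--             elif prev_y == y and prev_x < x:  # moved only right
--                 string += 's'
--
--             prev_x = x
--             prev_y = y
--
--     return string
-- ===== SOURCE B (Python) =====
-- def _dir(p, q):
--     (px, py), (x, y) = p, q
--     if px == x and py < y:
--         return 'd'
--     if px == x and py > y:
--         return 'a'
--     if py == y and px > x:
--         return 'w'
--     if py == y and px < x:
--         return 's'
--     return ''
--
--
-- def parse_list_to_op_string(pathlist):
--     # Divide and conquer: split the path at the midpoint (sharing the junction
--     # point) and concatenate the op strings of the two halves.
--     n = len(pathlist)
--     if n < 2:
--         return ''
--     if n == 2: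
--         return _dir(pathlist[0], pathlist[1])
--     m = n // 2
--     return parse_list_to_op_string(pathlist[:m + 1]) + parse_list_to_op_string(pathlist[m:])
-- ===== Notes on version B (the rewrite author's own statement) =====
-- stated objective: alternative
-- what changed: Replaces A's single stateful scan carrying prev_x/prev_y and a first-iteration sentinel by a divide-and-conquer recursion: the path is split at its midpoint (the two halves sharing the junction point), each half is translated recursively, and the two op strings are concatenated; the two-point base case emits one direction character.
-- intended difference: On lists where a point (-1,-1) is immediately followed by a point that moved along exactly one axis, A silently drops that move's character because (-1,-1) collides with its first-iteration sentinel value; B emits the direction character, which is the intended translation of that move. — e.g. on parse_list_to_op_string([(-1, -1), (0, -1)]): A returns "", B returns "s"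
import Mathlib
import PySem

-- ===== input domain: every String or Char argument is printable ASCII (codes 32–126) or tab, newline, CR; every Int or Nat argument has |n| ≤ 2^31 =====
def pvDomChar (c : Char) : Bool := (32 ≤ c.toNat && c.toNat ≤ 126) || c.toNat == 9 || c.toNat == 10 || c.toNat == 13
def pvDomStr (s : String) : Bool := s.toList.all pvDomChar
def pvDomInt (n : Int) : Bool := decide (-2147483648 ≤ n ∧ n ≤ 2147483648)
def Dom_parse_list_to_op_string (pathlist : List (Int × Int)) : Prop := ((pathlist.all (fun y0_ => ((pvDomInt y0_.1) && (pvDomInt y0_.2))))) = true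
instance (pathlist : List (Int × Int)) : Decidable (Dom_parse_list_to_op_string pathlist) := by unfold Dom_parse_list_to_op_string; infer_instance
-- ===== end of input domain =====

-- B replaces A's stateful prev_x/prev_y scan with a first-iteration sentinel by a
-- divide-and-conquer recursion: split the path at the midpoint (halves share the
-- junction point), translate each half recursively, concatenate (objective: alternative).

-- ===== PORT A =====
-- the accumulating loop of A: state = (string, prev_x, prev_y); chars carried as List Char
def pvLoopA : List Char → Int → Int → List (Int × Int) → List Char
  | s, _, _, [] => s
  | s, px, py, (x, y) :: rest =>
    if px = -1 ∧ py = -1 then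
      pvLoopA s x y rest
    else
      let s' :=
        if px = x ∧ py < y then s ++ ['d']
        else if px = x ∧ py > y then s ++ ['a']
        else if py = y ∧ px > x then s ++ ['w']
        else if py = y ∧ px < x then s ++ ['s']
        else s
      pvLoopA s' x y rest

def parse_list_to_op_string (pathlist : List (Int × Int)) : String :=
  String.ofList (pvLoopA [] (-1) (-1) pathlist)

-- ===== PORT B =====
-- _dir: the direction character for one consecutive pair ('' when not axis-aligned)
def pvDir (p q : Int × Int) : String :=
  if p.1 = q.1 ∧ p.2 < q.2 then "d"
  else if p.1 = q.1 ∧ p.2 > q.2 then "a"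
  else if p.2 = q.2 ∧ p.1 > q.1 then "w"
  else if p.2 = q.2 ∧ p.1 < q.1 then "s"
  else ""

-- the slices pathlist[:m+1] / pathlist[m:] have nonnegative in-range bounds, so
-- List.take / List.drop are exact here; the fuel argument only makes the recursion
-- structural (fuel = length always suffices: each half is strictly shorter)
def pvGoB : Nat → List (Int × Int) → String
  | 0, _ => ""
  | fuel + 1, l =>
    if l.length < 2 then ""
    else if l.length = 2 then pvDir l[0]! l[1]!
    else
      pvGoB fuel (l.take (l.length / 2 + 1)) ++ pvGoB fuel (l.drop (l.length / 2))

def parse_list_to_op_string_alt (pathlist : List (Int × Int)) : String :=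
  pvGoB pathlist.length pathlist

-- ===== PRECONDITION & SPEC =====
-- On lists where a point (-1,-1) is immediately followed by a point that moved along exactly
-- one axis, A silently drops that move's character ((-1,-1) collides with its first-iteration
-- sentinel); B emits the direction character, the intended translation of that move.
def D_parse_list_to_op_string (pathlist : List (Int × Int)) : Prop :=
  ∃ pr ∈ pathlist.zip pathlist.tail,
    pr.1 = ((-1 : Int), (-1 : Int)) ∧
      ((pr.2.1 = -1 ∧ pr.2.2 ≠ -1) ∨ (pr.2.2 = -1 ∧ pr.2.1 ≠ -1))
instance (pathlist : List (Int × Int)) : Decidable (D_parse_list_to_op_string pathlist) := by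
  unfold D_parse_list_to_op_string; infer_instance

def Spec_parse_list_to_op_string (pathlist : List (Int × Int)) (out : String) : Prop :=
  ¬ D_parse_list_to_op_string pathlist → out = parse_list_to_op_string_alt pathlist
instance (pathlist : List (Int × Int)) (out : String) :
    Decidable (Spec_parse_list_to_op_string pathlist out) := by
  unfold Spec_parse_list_to_op_string; infer_instance

def pvDiffWitness_parse_list_to_op_string : (List (Int × Int)) := [(-1, -1), (0, -1)]
def pvDiffWitnessOut_parse_list_to_op_string : String × String := ("", "s")

-- ===== CLAIM (what is proved, stated in full; the proofs are below) =====
def Claim_unchanged_parse_list_to_op_string : Prop :=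
  ∀ (pathlist : List (Int × Int)), Dom_parse_list_to_op_string pathlist →
    Spec_parse_list_to_op_string pathlist (parse_list_to_op_string pathlist)
def Claim_changed_parse_list_to_op_string : Prop :=
  Dom_parse_list_to_op_string (pvDiffWitness_parse_list_to_op_string) ∧
  D_parse_list_to_op_string (pvDiffWitness_parse_list_to_op_string) ∧
  parse_list_to_op_string (pvDiffWitness_parse_list_to_op_string) = pvDiffWitnessOut_parse_list_to_op_string.1 ∧
  parse_list_to_op_string_alt (pvDiffWitness_parse_list_to_op_string) = pvDiffWitnessOut_parse_list_to_op_string.2 ∧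
  pvDiffWitnessOut_parse_list_to_op_string.1 ≠ pvDiffWitnessOut_parse_list_to_op_string.2
def Claim_exact_parse_list_to_op_string : Prop :=
  ∀ (pathlist : List (Int × Int)), Dom_parse_list_to_op_string pathlist →
    D_parse_list_to_op_string pathlist →
      parse_list_to_op_string pathlist ≠ parse_list_to_op_string_alt pathlist

-- ===== LEMMAS AND PROOFS =====

-- A's per-pair emission (no sentinel guard)
def pvEmit (p q : Int × Int) : Option Char :=
  if p.1 = q.1 ∧ p.2 < q.2 then some 'd'
  else if p.1 = q.1 ∧ p.2 > q.2 then some 'a'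
  else if p.2 = q.2 ∧ p.1 > q.1 then some 'w'
  else if p.2 = q.2 ∧ p.1 < q.1 then some 's'
  else none

-- A's per-pair emission with the sentinel guard
def pvEmitG (p q : Int × Int) : Option Char :=
  if p.1 = -1 ∧ p.2 = -1 then none else pvEmit p q

theorem pvLoopA_closed :
    ∀ (l : List (Int × Int)) (px py : Int) (s : List Char),
      pvLoopA s px py l =
        s ++ (((px, py) :: l).zip l).filterMap (fun pq => pvEmitG pq.1 pq.2) := by
  intro l
  induction l with
  | nil => intro px py s; simp [pvLoopA]
  | cons q rest ih =>
    intro px py s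
    obtain ⟨x, y⟩ := q
    show pvLoopA s px py ((x, y) :: rest) = _
    rw [show (((px, py) :: (x, y) :: rest).zip ((x, y) :: rest)) =
        ((px, py), (x, y)) :: (((x, y) :: rest).zip rest) from rfl]
    rw [List.filterMap_cons]
    by_cases hs : px = -1 ∧ py = -1
    · have : pvEmitG (px, py) (x, y) = none := by simp [pvEmitG, hs]
      rw [pvLoopA, if_pos hs, ih, this]
    · have hg : pvEmitG (px, py) (x, y) = pvEmit (px, py) (x, y) := by
        simp [pvEmitG, hs]
      rw [pvLoopA, if_neg hs, ih]
      rw [hg]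
      unfold pvEmit
      dsimp only
      split_ifs <;> simp

theorem portA_closed (l : List (Int × Int)) :
    parse_list_to_op_string l =
      String.ofList ((l.zip l.tail).filterMap (fun pq => pvEmitG pq.1 pq.2)) := by
  cases l with
  | nil => rfl
  | cons p rest =>
    obtain ⟨x, y⟩ := p
    show String.ofList (pvLoopA [] (-1) (-1) ((x, y) :: rest)) = _
    rw [pvLoopA, if_pos ⟨rfl, rfl⟩, pvLoopA_closed]
    rfl

theorem pv_ofList_append (a b : List Char) :
    String.ofList (a ++ b) = String.ofList a ++ String.ofList b := by
  rw [String.ofList_eq]; simp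

-- zip-splitting helpers for the divide-and-conquer port
theorem pv_zip_take {α β : Type} :
    ∀ (n : Nat) (l : List α) (l' : List β),
      (l.zip l').take n = (l.take n).zip (l'.take n) := by
  intro n
  induction n with
  | zero => intro l l'; simp
  | succ n ih =>
    intro l l'
    cases l with
    | nil => simp
    | cons a t =>
      cases l' with
      | nil => simp
      | cons b t' => simp [List.zip_cons_cons, ih]

theorem pv_zip_drop {α β : Type} :
    ∀ (n : Nat) (l : List α) (l' : List β),
      (l.zip l').drop n = (l.drop n).zip (l'.drop n) := by
  intro n
  induction n with
  | zero => intro l l'; simp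
  | succ n ih =>
    intro l l'
    cases l with
    | nil => simp
    | cons a t =>
      cases l' with
      | nil => simp
      | cons b t' => simp [List.zip_cons_cons, ih]

theorem pv_zip_take_succ {α β : Type} :
    ∀ (n : Nat) (l : List α) (l' : List β), (l'.length ≤ n) →
      (l.take (n + 1)).zip l' = (l.take n).zip l' := by
  intro n
  induction n with
  | zero =>
    intro l l' h
    have : l' = [] := List.eq_nil_of_length_eq_zero (Nat.le_zero.mp h)
    simp [this]
  | succ n ih =>
    intro l l' h
    cases l with
    | nil => simp
    | cons a t =>
      cases l' with
      | nil => simp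
      | cons b t' =>
        simp only [List.take_succ_cons, List.zip_cons_cons]
        rw [ih t t' (by simpa using h)]

theorem pv_pairs_split (l : List (Int × Int)) (m : Nat) (h1 : 1 ≤ m) (h2 : m < l.length) :
    l.zip l.tail =
      (l.take (m + 1)).zip (l.take (m + 1)).tail ++ (l.drop m).zip (l.drop m).tail := by
  have htt : (l.take (m + 1)).tail = l.tail.take m := by
    cases l <;> simp
  have htd : (l.drop m).tail = l.tail.drop m := by
    cases l with
    | nil => simp
    | cons a t =>
      cases m with
      | zero => omega
      | succ k => simp [List.drop_succ_cons, List.tail_drop]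
  rw [htt, htd]
  have e1 : (l.take (m + 1)).zip (l.tail.take m) = (l.take m).zip (l.tail.take m) :=
    pv_zip_take_succ m l (l.tail.take m) (by simp only [List.length_take]; omega)
  rw [e1, ← pv_zip_take, ← pv_zip_drop, List.take_append_drop]

theorem pvGoB_closed :
    ∀ (fuel : Nat) (l : List (Int × Int)), l.length ≤ fuel →
      pvGoB fuel l =
        String.ofList ((l.zip l.tail).filterMap (fun pq => pvEmit pq.1 pq.2)) := by
  intro fuel
  induction fuel with
  | zero =>
    intro l hl
    have : l = [] := List.eq_nil_of_length_eq_zero (Nat.le_zero.mp hl)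
    subst this; rfl
  | succ fuel ih =>
    intro l hl
    by_cases h1 : l.length < 2
    · rw [pvGoB, if_pos h1]
      match l, h1 with
      | [], _ => rfl
      | [a], _ => rfl
    · by_cases h2 : l.length = 2
      · rw [pvGoB, if_neg h1, if_pos h2]
        obtain ⟨p, q, rfl⟩ := List.length_eq_two.mp h2
        show pvDir p q = _
        simp only [List.zip_cons_cons, List.tail_cons, List.zip_nil_right,
          List.filterMap_cons, List.filterMap_nil]
        unfold pvDir pvEmit
        split_ifs <;> rfl
      · rw [pvGoB, if_neg h1, if_neg h2]
        rw [ih (l.take (l.length / 2 + 1)) (by simp only [List.length_take]; omega),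
          ih (l.drop (l.length / 2)) (by simp only [List.length_drop]; omega)]
        rw [pv_pairs_split l (l.length / 2) (by omega) (by omega), List.filterMap_append,
          pv_ofList_append]

theorem portB_closed (l : List (Int × Int)) :
    parse_list_to_op_string_alt l =
      String.ofList ((l.zip l.tail).filterMap (fun pq => pvEmit pq.1 pq.2)) :=
  pvGoB_closed l.length l (Nat.le_refl _)

theorem pvEmit_sentinel_none_iff (q : Int × Int) :
    pvEmit (-1, -1) q = none ↔
      ¬ ((q.1 = -1 ∧ q.2 ≠ -1) ∨ (q.2 = -1 ∧ q.1 ≠ -1)) := by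
  obtain ⟨c, d⟩ := q
  simp only [pvEmit]
  split_ifs <;> simp <;> omega

theorem pv_len_lt :
    ∀ (l : List ((Int × Int) × (Int × Int))),
      (∃ pr ∈ l, pr.1 = ((-1 : Int), (-1 : Int)) ∧ pvEmit pr.1 pr.2 ≠ none) →
        (l.filterMap (fun pq => pvEmitG pq.1 pq.2)).length <
          (l.filterMap (fun pq => pvEmit pq.1 pq.2)).length := by
  have hle : ∀ (l : List ((Int × Int) × (Int × Int))),
      (l.filterMap (fun pq => pvEmitG pq.1 pq.2)).length ≤
        (l.filterMap (fun pq => pvEmit pq.1 pq.2)).length := by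
    intro l
    induction l with
    | nil => simp
    | cons x t ih =>
      rw [List.filterMap_cons, List.filterMap_cons]
      have : pvEmitG x.1 x.2 = none ∨ pvEmitG x.1 x.2 = pvEmit x.1 x.2 := by
        unfold pvEmitG; split_ifs <;> simp
      rcases this with h | h <;> rw [h] <;>
        cases hE : pvEmit x.1 x.2 <;> simp <;> omega
  intro l
  induction l with
  | nil => rintro ⟨_, h, _⟩; cases h
  | cons x t ih =>
    rintro ⟨pr, hmem, hpr⟩
    rw [List.filterMap_cons, List.filterMap_cons]
    rcases List.mem_cons.mp hmem with rfl | hmem'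
    · have hg : pvEmitG pr.1 pr.2 = none := by
        unfold pvEmitG
        rw [if_pos (by rw [hpr.1]; exact ⟨rfl, rfl⟩)]
      rw [hg]
      cases hE : pvEmit pr.1 pr.2 with
      | none => exact absurd hE hpr.2
      | some c => simpa using Nat.lt_succ_of_le (hle t)
    · have hlt := ih ⟨pr, hmem', hpr⟩
      have : pvEmitG x.1 x.2 = none ∨ pvEmitG x.1 x.2 = pvEmit x.1 x.2 := by
        unfold pvEmitG; split_ifs <;> simp
      rcases this with h | h <;> rw [h] <;>
        cases hE : pvEmit x.1 x.2 <;> simp <;> omega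

-- ===== VERDICT (by name: the statement is the Claim_ definition above) =====
theorem parse_list_to_op_string_spec : Claim_unchanged_parse_list_to_op_string := by
  intro l _ hD
  rw [portA_closed, portB_closed]
  congr 1
  apply List.filterMap_congr
  intro pq hmem
  by_cases hs : pq.1 = ((-1 : Int), (-1 : Int))
  · have hnone : pvEmit pq.1 pq.2 = none := by
      rw [hs]
      rw [pvEmit_sentinel_none_iff]
      intro hc
      exact hD ⟨pq, hmem, hs, hc⟩
    rw [hnone]; simp [pvEmitG, hs]
  · have : ¬ (pq.1.1 = -1 ∧ pq.1.2 = -1) := by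
      intro h; exact hs (Prod.ext h.1 h.2)
    simp [pvEmitG, this]

theorem parse_list_to_op_string_changed : Claim_changed_parse_list_to_op_string := by
  unfold Claim_changed_parse_list_to_op_string
  refine ⟨by decide, by decide, ?_, ?_, by simp [pvDiffWitnessOut_parse_list_to_op_string]⟩
  · rfl
  · rfl

theorem parse_list_to_op_string_tight : Claim_exact_parse_list_to_op_string := by
  intro l _ hD heq
  rw [portA_closed, portB_closed] at heq
  have hlist := congrArg String.toList heq
  simp only [String.toList_ofList] at hlist
  obtain ⟨pr, hmem, hpr1, hc⟩ := hD
  have hne : pvEmit pr.1 pr.2 ≠ none := by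
    rw [hpr1, Ne, pvEmit_sentinel_none_iff]
    exact not_not.mpr hc
  have := pv_len_lt (l.zip l.tail) ⟨pr, hmem, hpr1, hne⟩
  rw [hlist] at this
  omega
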